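-- pv_equiv track=rewrite | github.com/krishnabujagouni/geo-tool | backend/app/services/ai_service.py | build_rewrite_instructions
-- ===== SOURCE A (Python) =====
-- from typing import Dict, List, Optional
--
-- def build_rewrite_instructions(improvements: List[str], issues: Optional[List[Dict]]) -> str:
--     """Build improvement instructions for Claude"""
--     parts = []
--
--     if "add_statistics" in improvements:
--         parts.append("""ADD STATISTICS:
-- - Add 3-5 relevant statistics with percentages or numbers
-- - Format: "According to [source], X% of..." or "Studies show..."
-- - Use specific numbers, not vague quantities""")
--
--     if "add_citations" in improvements:
--         parts.append("""ADD CITATIONS: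
-- - Reference 2-3 credible sources (research, .gov, .edu)
-- - Use "According to [Source]..." or "Research from [Institution]..."
-- - Mention specific studies or reports""")
--
--     if "add_quotes" in improvements:
--         parts.append("""ADD EXPERT QUOTES:
-- - Add 1-2 expert quotes
-- - Format: "As [Name], [Title] at [Org], explains: '...'"
-- - Make quotes specific and insightful""")
--
--     if "simplify_language" in improvements:
--         parts.append("""SIMPLIFY LANGUAGE:
-- - Reduce sentences to 15-20 words average
-- - Replace jargon with plain language
-- - Use active voice
-- - Target 8th-10th grade reading level""")
--
--     if "create_answer_blocks" in improvements:
--         parts.append("""CREATE ANSWER BLOCKS: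
-- - Make key paragraphs 40-60 words
-- - Each block should answer a question completely
-- - Start with the main point (inverted pyramid)
-- - Make blocks self-contained for AI to quote""")
--
--     if "add_definitions" in improvements:
--         parts.append("""ADD DEFINITIONS:
-- - Add clear definitions for key terms
-- - Use "X is defined as..." or "X refers to..."
-- - Make definitions concise and quotable""")
--
--     if issues:
--         issue_fixes = [f"- {i['fix']}" for i in issues[:5] if i.get('fix')]
--         if issue_fixes:
--             parts.append(f"ADDRESS THESE ISSUES:\n" + "\n".join(issue_fixes))
--
--     return "\n\n".join(parts)
-- ===== SOURCE B (Python) =====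
-- from typing import Dict, List, Optional
--
-- _SECTIONS = [
--     ("add_statistics", """ADD STATISTICS:
-- - Add 3-5 relevant statistics with percentages or numbers
-- - Format: "According to [source], X% of..." or "Studies show..."
-- - Use specific numbers, not vague quantities"""),
--     ("add_citations", """ADD CITATIONS:
-- - Reference 2-3 credible sources (research, .gov, .edu)
-- - Use "According to [Source]..." or "Research from [Institution]..."
-- - Mention specific studies or reports"""),
--     ("add_quotes", """ADD EXPERT QUOTES:
-- - Add 1-2 expert quotes
-- - Format: "As [Name], [Title] at [Org], explains: '...'"
-- - Make quotes specific and insightful"""),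
--     ("simplify_language", """SIMPLIFY LANGUAGE:
-- - Reduce sentences to 15-20 words average
-- - Replace jargon with plain language
-- - Use active voice
-- - Target 8th-10th grade reading level"""),
--     ("create_answer_blocks", """CREATE ANSWER BLOCKS:
-- - Make key paragraphs 40-60 words
-- - Each block should answer a question completely
-- - Start with the main point (inverted pyramid)
-- - Make blocks self-contained for AI to quote"""),
--     ("add_definitions", """ADD DEFINITIONS:
-- - Add clear definitions for key terms
-- - Use "X is defined as..." or "X refers to..."
-- - Make definitions concise and quotable"""),
-- ]
--
--
-- def _append_part(out, part):
--     """Append one block to the accumulated text, inserting the blank-line separator."""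
--     return part if not out else out + "\n\n" + part
--
--
-- def _fixes_text(issues, budget):
--     """Recursively concatenate '\n- <fix>' for the first `budget` issues with a truthy fix."""
--     if not issues or budget == 0:
--         return ""
--     f = issues[0].get('fix')
--     head = "\n- " + f if f else ""
--     return head + _fixes_text(issues[1:], budget - 1)
--
--
-- def build_rewrite_instructions(improvements: List[str], issues: Optional[List[Dict]]) -> str:
--     out = ""
--     for flag, text in _SECTIONS:
--         if flag in improvements:
--             out = _append_part(out, text)
--     fixes = _fixes_text(issues or [], 5)
--     if fixes:
--         out = _append_part(out, "ADDRESS THESE ISSUES:" + fixes)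
--     return out
-- ===== Notes on version B (the rewrite author's own statement) =====
-- stated objective: alternative
-- what changed: Instead of A's two-phase shape (append whole blocks to a list, then '\n\n'.join, with the issues block built by slice+filter+comprehension+'\n'.join), B builds the result string in a single pass with an accumulator helper that inserts the blank-line separator as it appends, and builds the issues text by a bounded recursion (_fixes_text) that concatenates '\n- fix' pieces directly with a budget counter instead of slicing and joining.
import Mathlib
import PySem

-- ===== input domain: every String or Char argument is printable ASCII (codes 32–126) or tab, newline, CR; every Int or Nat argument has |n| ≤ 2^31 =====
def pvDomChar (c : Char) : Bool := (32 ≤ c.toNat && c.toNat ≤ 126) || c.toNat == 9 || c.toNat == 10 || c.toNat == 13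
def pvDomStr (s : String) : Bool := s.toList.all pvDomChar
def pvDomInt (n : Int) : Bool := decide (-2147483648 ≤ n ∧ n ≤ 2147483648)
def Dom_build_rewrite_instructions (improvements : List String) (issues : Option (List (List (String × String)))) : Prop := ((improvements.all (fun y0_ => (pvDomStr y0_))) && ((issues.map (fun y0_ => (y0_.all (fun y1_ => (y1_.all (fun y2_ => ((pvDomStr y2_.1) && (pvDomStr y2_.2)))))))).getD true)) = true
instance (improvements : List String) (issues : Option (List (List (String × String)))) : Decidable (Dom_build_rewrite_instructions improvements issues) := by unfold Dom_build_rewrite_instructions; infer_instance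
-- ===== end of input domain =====

-- B replaces A's "append blocks to a list, join at the end" shape by a single-pass string
-- accumulator that inserts the separator as it goes, and builds the issues text by a
-- bounded recursion instead of slice+filter+comprehension+join (objective: alternative).

-- i.get('fix') on an association-list dict: first match (exact port of dict lookup)
def pvGetFix (i : List (String × String)) : Option String :=
  (i.find? (fun p => p.1 == "fix")).map (·.2)

-- ===== PORT A =====
def build_rewrite_instructions (improvements : List String) (issues : Option (List (List (String × String)))) : String :=
  let parts : List String := []
  let parts := if improvements.contains "add_statistics" then
    parts ++ ["ADD STATISTICS:\n- Add 3-5 relevant statistics with percentages or numbers\n- Format: \"According to [source], X% of...\" or \"Studies show...\"\n- Use specific numbers, not vague quantities"] else parts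
  let parts := if improvements.contains "add_citations" then
    parts ++ ["ADD CITATIONS:\n- Reference 2-3 credible sources (research, .gov, .edu)\n- Use \"According to [Source]...\" or \"Research from [Institution]...\"\n- Mention specific studies or reports"] else parts
  let parts := if improvements.contains "add_quotes" then
    parts ++ ["ADD EXPERT QUOTES:\n- Add 1-2 expert quotes\n- Format: \"As [Name], [Title] at [Org], explains: '...'\"\n- Make quotes specific and insightful"] else parts
  let parts := if improvements.contains "simplify_language" then
    parts ++ ["SIMPLIFY LANGUAGE:\n- Reduce sentences to 15-20 words average\n- Replace jargon with plain language\n- Use active voice\n- Target 8th-10th grade reading level"] else parts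
  let parts := if improvements.contains "create_answer_blocks" then
    parts ++ ["CREATE ANSWER BLOCKS:\n- Make key paragraphs 40-60 words\n- Each block should answer a question completely\n- Start with the main point (inverted pyramid)\n- Make blocks self-contained for AI to quote"] else parts
  let parts := if improvements.contains "add_definitions" then
    parts ++ ["ADD DEFINITIONS:\n- Add clear definitions for key terms\n- Use \"X is defined as...\" or \"X refers to...\"\n- Make definitions concise and quotable"] else parts
  -- `if issues:` — truthy iff Some nonempty list; issues[:5] with nonnegative bound = take 5 (exact)
  let parts := match issues with
    | none => parts
    | some is =>
      if is ≠ [] then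
        let issue_fixes := ((is.take 5).filter (fun i => (pvGetFix i).getD "" != "")).map
          (fun i => "- " ++ (pvGetFix i).getD "")
        if issue_fixes ≠ [] then
          parts ++ ["ADDRESS THESE ISSUES:\n" ++ PySem.Str.join "\n" issue_fixes]
        else parts
      else parts
  PySem.Str.join "\n\n" parts

-- ===== PORT B =====
def pvSectionTable : List (String × String) :=
  [("add_statistics", "ADD STATISTICS:\n- Add 3-5 relevant statistics with percentages or numbers\n- Format: \"According to [source], X% of...\" or \"Studies show...\"\n- Use specific numbers, not vague quantities"),
   ("add_citations", "ADD CITATIONS:\n- Reference 2-3 credible sources (research, .gov, .edu)\n- Use \"According to [Source]...\" or \"Research from [Institution]...\"\n- Mention specific studies or reports"),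
   ("add_quotes", "ADD EXPERT QUOTES:\n- Add 1-2 expert quotes\n- Format: \"As [Name], [Title] at [Org], explains: '...'\"\n- Make quotes specific and insightful"),
   ("simplify_language", "SIMPLIFY LANGUAGE:\n- Reduce sentences to 15-20 words average\n- Replace jargon with plain language\n- Use active voice\n- Target 8th-10th grade reading level"),
   ("create_answer_blocks", "CREATE ANSWER BLOCKS:\n- Make key paragraphs 40-60 words\n- Each block should answer a question completely\n- Start with the main point (inverted pyramid)\n- Make blocks self-contained for AI to quote"),
   ("add_definitions", "ADD DEFINITIONS:\n- Add clear definitions for key terms\n- Use \"X is defined as...\" or \"X refers to...\"\n- Make definitions concise and quotable")]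

-- _append_part: append one block to the accumulated text, inserting the blank-line separator
def pvAppendPart (out part : String) : String :=
  if out == "" then part else out ++ "\n\n" ++ part

-- _fixes_text: recursively concatenate "\n- <fix>" for the first `budget` issues with a truthy fix
def pvFixesText : List (List (String × String)) → Nat → String
  | [], _ => ""
  | _ :: _, 0 => ""
  | i :: rest, Nat.succ n =>
    let f := (pvGetFix i).getD ""
    (if f != "" then "\n- " ++ f else "") ++ pvFixesText rest n

def build_rewrite_instructions_alt (improvements : List String) (issues : Option (List (List (String × String)))) : String :=
  let out := pvSectionTable.foldl
    (fun out p => if improvements.contains p.1 then pvAppendPart out p.2 else out) ""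
  let fixes := pvFixesText (issues.getD []) 5
  if fixes != "" then pvAppendPart out ("ADDRESS THESE ISSUES:" ++ fixes) else out

-- ===== PRECONDITION & SPEC =====
def Spec_build_rewrite_instructions (improvements : List String) (issues : Option (List (List (String × String)))) (out : String) : Prop := out = build_rewrite_instructions_alt improvements issues
instance (improvements : List String) (issues : Option (List (List (String × String)))) (out : String) : Decidable (Spec_build_rewrite_instructions improvements issues out) := by unfold Spec_build_rewrite_instructions; infer_instance

-- ===== CLAIM (what is proved, stated in full; the proofs are below) =====
def Claim_equal_build_rewrite_instructions : Prop := ∀ (improvements : List String) (issues : Option (List (List (String × String)))), Dom_build_rewrite_instructions improvements issues → Spec_build_rewrite_instructions improvements issues (build_rewrite_instructions improvements issues)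

-- ===== LEMMAS AND PROOFS =====

-- the list of "- <fix>" lines A builds from the first n issues
def pvFixList (is : List (List (String × String))) (n : Nat) : List String :=
  ((is.take n).filter (fun i => (pvGetFix i).getD "" != "")).map (fun i => "- " ++ (pvGetFix i).getD "")

-- the section texts selected by `improvements`
def pvSel (improvements : List String) : List String :=
  (pvSectionTable.filter (fun p => improvements.contains p.1)).map (·.2)

-- the full list of blocks both programs assemble
def pvParts (improvements : List String) (issues : Option (List (List (String × String)))) : List String :=
  pvSel improvements ++
    (if pvFixList (issues.getD []) 5 = [] then []
     else ["ADDRESS THESE ISSUES:\n" ++ PySem.Str.join "\n" (pvFixList (issues.getD []) 5)])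

lemma str_ne_empty_of_toList (s : String) (h : s.toList ≠ []) : s ≠ "" := by
  intro he; subst he; simp at h

lemma join_toList (sep : String) (l : List String) :
    (PySem.Str.join sep l).toList = sep.toList.intercalate (l.map String.toList) := by
  simp [PySem.Str.join, PySem.Chars.join]

lemma intercalate_cons_cons' (sep a b : List Char) (l : List (List Char)) :
    sep.intercalate (a :: b :: l) = a ++ sep ++ sep.intercalate (b :: l) := by
  simp [List.intercalate, List.intersperse]

lemma intercalate_append_singleton (sep x : List Char) :
    ∀ (l : List (List Char)), l ≠ [] →
      sep.intercalate (l ++ [x]) = sep.intercalate l ++ sep ++ x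
  | [], h => absurd rfl h
  | [a], _ => by simp [List.intercalate, List.intersperse]
  | a :: b :: t, _ => by
    have hc : b :: (t ++ [x]) = (b :: t) ++ [x] := rfl
    rw [List.cons_append, List.cons_append, intercalate_cons_cons', hc,
      intercalate_append_singleton sep x (b :: t) (by simp),
      intercalate_cons_cons' sep a b t]
    simp [List.append_assoc]

lemma join_ne_empty (ps : List String) (hne : ps ≠ []) (h : ∀ p ∈ ps, p ≠ "") :
    PySem.Str.join "\n\n" ps ≠ "" := by
  apply str_ne_empty_of_toList
  rw [join_toList]
  match ps, hne with
  | [a], _ =>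
    have := h a (by simp)
    simp [List.intercalate, List.intersperse]
    intro hx; exact this (by cases a; simp_all)
  | a :: b :: t, _ =>
    rw [List.map_cons, List.map_cons, intercalate_cons_cons']
    have := h a (by simp)
    intro hx
    rcases List.append_eq_nil_iff.mp (List.append_eq_nil_iff.mp hx).1 with ⟨h1, -⟩
    exact this (by cases a; simp_all)

lemma fold_join (ps : List String) (h : ∀ p ∈ ps, p ≠ "") :
    ps.foldl pvAppendPart "" = PySem.Str.join "\n\n" ps := by
  induction ps using List.reverseRecOn with
  | nil => rfl
  | append_singleton ps p ih =>
    have hps : ∀ q ∈ ps, q ≠ "" := fun q hq => h q (by simp [hq])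
    rw [List.foldl_append, List.foldl_cons, List.foldl_nil, ih hps]
    by_cases hnil : ps = []
    · subst hnil
      apply String.toList_injective
      simp [pvAppendPart, PySem.Str.join, PySem.Chars.join, List.intercalate, List.intersperse]
    · have hne := join_ne_empty ps hnil hps
      rw [pvAppendPart, if_neg (by simpa using hne)]
      apply String.toList_injective
      rw [join_toList, List.map_append, List.map_singleton,
        intercalate_append_singleton _ _ _ (by simpa using hnil)]
      simp [join_toList, PySem.Chars.join]

-- structure of the recursive fixes text relative to A's list of fix lines
lemma fixes_struct (is : List (List (String × String))) (n : Nat) :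
    (pvFixesText is n = "" ∧ pvFixList is n = []) ∨
    (pvFixesText is n = "\n" ++ PySem.Str.join "\n" (pvFixList is n) ∧ pvFixList is n ≠ []) := by
  induction is generalizing n with
  | nil => left; cases n <;> simp [pvFixesText, pvFixList]
  | cons i rest ih =>
    cases n with
    | zero => left; simp [pvFixesText, pvFixList]
    | succ n =>
      by_cases hf : (pvGetFix i).getD "" = ""
      · have hl : pvFixList (i :: rest) (n + 1) = pvFixList rest n := by
          simp [pvFixList, List.take_succ_cons, List.filter_cons, hf]
        have ht : pvFixesText (i :: rest) (n + 1) = pvFixesText rest n := by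
          rw [pvFixesText]; simp [hf]
        rw [hl, ht]; exact ih n
      · have hl : pvFixList (i :: rest) (n + 1) =
            ("- " ++ (pvGetFix i).getD "") :: pvFixList rest n := by
          simp [pvFixList, List.take_succ_cons, List.filter_cons, hf]
        have ht : pvFixesText (i :: rest) (n + 1) =
            ("\n- " ++ (pvGetFix i).getD "") ++ pvFixesText rest n := by
          rw [pvFixesText]; simp [hf]
        right
        refine ⟨?_, by simp [hl]⟩
        rw [hl, ht]
        rcases ih n with ⟨h1, h2⟩ | ⟨h1, h2⟩
        · rw [h1, h2]
          apply String.toList_injective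
          simp [join_toList, List.intercalate, List.intersperse]
        · obtain ⟨b, t, hbt⟩ := List.exists_cons_of_ne_nil h2
          rw [h1, hbt]
          apply String.toList_injective
          simp only [join_toList, PySem.Chars.join, List.map_cons, intercalate_cons_cons',
            String.toList_append]
          simp

-- A assembles exactly join "\n\n" (pvParts …)
set_option maxHeartbeats 1000000 in
lemma A_eq (improvements : List String) (issues : Option (List (List (String × String)))) :
    build_rewrite_instructions improvements issues =
      PySem.Str.join "\n\n" (pvParts improvements issues) := by
  unfold build_rewrite_instructions pvParts pvSel pvFixList pvSectionTable
  cases issues with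
  | none =>
    simp only [Option.getD_none, List.take_nil, List.filter_nil, List.map_nil,
      List.filter_cons, List.map_cons, if_pos rfl, List.append_nil]
    split_ifs <;> rfl
  | some is =>
    simp only [Option.getD_some, List.filter_cons]
    by_cases his : is = []
    · subst his
      simp only [List.take_nil, List.filter_nil, List.map_nil, ne_eq, not_true_eq_false,
        if_false, if_pos rfl, List.append_nil]
      split_ifs <;> rfl
    · rw [if_pos his]
      by_cases hfl : ((is.take 5).filter (fun i => (pvGetFix i).getD "" != "")).map
          (fun i => "- " ++ (pvGetFix i).getD "") = []
      · rw [if_neg (not_not_intro hfl), if_pos hfl, List.append_nil]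
        split_ifs <;> rfl
      · rw [if_pos hfl, if_neg hfl]
        split_ifs <;> rfl

-- B assembles exactly foldl pvAppendPart "" (pvParts …)
lemma B_eq (improvements : List String) (issues : Option (List (List (String × String)))) :
    build_rewrite_instructions_alt improvements issues =
      (pvParts improvements issues).foldl pvAppendPart "" := by
  unfold build_rewrite_instructions_alt
  have hsel : pvSectionTable.foldl
      (fun out p => if improvements.contains p.1 then pvAppendPart out p.2 else out) "" =
      (pvSel improvements).foldl pvAppendPart "" := by
    rw [pvSel, List.foldl_map, List.foldl_filter]
  rw [pvParts, hsel]
  rcases fixes_struct (issues.getD []) 5 with ⟨h1, h2⟩ | ⟨h1, h2⟩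
  · rw [h1, h2]
    simp [pvAppendPart]
  · have hne : pvFixesText (issues.getD []) 5 ≠ "" := by
      rw [h1]; apply str_ne_empty_of_toList; simp
    rw [if_neg h2, if_pos (by simpa using hne), List.foldl_append, List.foldl_cons,
      List.foldl_nil, h1]
    congr 1

set_option maxRecDepth 4096 in
lemma parts_ne_empty (improvements : List String) (issues : Option (List (List (String × String)))) :
    ∀ p ∈ pvParts improvements issues, p ≠ "" := by
  intro p hp
  rw [pvParts] at hp
  rcases List.mem_append.mp hp with hp | hp
  · rw [pvSel] at hp
    obtain ⟨x, hx, rfl⟩ := List.mem_map.mp hp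
    have hx' := List.mem_filter.mp hx |>.1
    simp only [pvSectionTable, List.mem_cons, List.not_mem_nil, or_false] at hx'
    rcases hx' with h | h | h | h | h | h <;> subst h <;> decide
  · split at hp
    · simp at hp
    · rw [List.mem_singleton.mp hp]
      apply str_ne_empty_of_toList
      simp

-- ===== VERDICT (by name: the statement is the Claim_ definition above) =====
theorem build_rewrite_instructions_spec : Claim_equal_build_rewrite_instructions := by
  intro improvements issues _
  unfold Spec_build_rewrite_instructions
  rw [A_eq, B_eq, fold_join _ (parts_ne_empty improvements issues)]
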